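-- pv_equiv track=rewrite | github.com/fabriziocosta/abstractgraph-generative | src/abstractgraph_generative/story/text_to_graph.py | _matches_main_character
-- ===== SOURCE A (Python) =====
-- def _matches_main_character(canonical_name: str, main_character_keys: set[str]) -> bool:
--     """Return True if canonical name matches one inferred main character.
--
--     Args:
--         canonical_name: Candidate canonical name.
--         main_character_keys: Main-character lowercased names.
--
--     Returns:
--         True on exact or token-overlap match.
--     """
--
--     key = canonical_name.lower()
--     if key in main_character_keys:
--         return True
--     tokens = {tok for tok in key.split() if tok}
--     if not tokens:
--         return False
--     for main_name in main_character_keys: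
--         main_tokens = {tok for tok in main_name.split() if tok}
--         if tokens & main_tokens:
--             return True
--     return False
-- ===== SOURCE B (Python) =====
-- def _matches_main_character(canonical_name: str, main_character_keys: set[str]) -> bool:
--     key = canonical_name.lower()
--     if key in main_character_keys:
--         return True
--     xs = sorted(set(key.split()))
--     ys = sorted({tok for name in main_character_keys for tok in name.split()})
--     i = j = 0
--     while i < len(xs) and j < len(ys):
--         if xs[i] == ys[j]:
--             return True
--         if xs[i] < ys[j]:
--             i += 1
--         else:
--             j += 1
--     return False
-- ===== Notes on version B (the rewrite author's own statement) =====
-- stated objective: alternative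
-- what changed: Replaces A's per-key token-set construction and hash intersections with a sort-then-merge algorithm: both token collections are deduplicated and sorted once, and a two-pointer merge scan detects a common token.
import Mathlib
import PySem

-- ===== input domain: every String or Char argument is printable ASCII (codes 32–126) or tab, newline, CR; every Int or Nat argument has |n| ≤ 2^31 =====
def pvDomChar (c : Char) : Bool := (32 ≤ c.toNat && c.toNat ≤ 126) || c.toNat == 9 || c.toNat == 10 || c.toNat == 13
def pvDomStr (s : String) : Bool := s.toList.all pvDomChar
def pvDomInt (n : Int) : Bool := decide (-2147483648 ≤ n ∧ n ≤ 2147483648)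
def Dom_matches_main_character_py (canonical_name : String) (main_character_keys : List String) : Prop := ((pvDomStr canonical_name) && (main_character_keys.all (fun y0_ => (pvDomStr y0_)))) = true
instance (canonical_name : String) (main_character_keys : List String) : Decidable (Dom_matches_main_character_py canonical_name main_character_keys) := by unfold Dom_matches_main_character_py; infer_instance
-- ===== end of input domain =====

-- B keeps the exact-match guard, then replaces A's per-key token-set builds and hash
-- intersections with a sort-then-merge algorithm: dedup+sort both token collections once
-- and detect a common token by a two-pointer merge scan (objective: alternative).
-- main_character_keys is a Python set, modelled as a List String of distinct elements;
-- both ports consume it only through order-independent operations.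

-- ===== PORT A =====
def matches_main_character_py (canonical_name : String) (main_character_keys : List String) : Bool :=
  let key := PySem.Str.lower canonical_name
  if main_character_keys.contains key then true
  else
    let tokens : PySem.Set String :=
      PySem.Set.ofList ((PySem.Str.split₀ key).filter (fun tok => tok ≠ ""))
    if tokens.isEmpty then false
    else
      main_character_keys.any (fun main_name =>
        let main_tokens : PySem.Set String :=
          PySem.Set.ofList ((PySem.Str.split₀ main_name).filter (fun tok => tok ≠ ""))
        !(PySem.Set.inter tokens main_tokens).isEmpty)

-- ===== PORT B =====
-- the two-pointer while loop of Source B: advancing pointer i (resp. j) is recursing on the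
-- first (resp. second) sorted list; the loop ends when either pointer runs off its list
def pvMergeHit : List String → List String → Bool
  | [], _ => false
  | _ :: _, [] => false
  | x :: xs, y :: ys =>
    if x = y then true
    else if x < y then pvMergeHit xs (y :: ys)
    else pvMergeHit (x :: xs) ys
termination_by a b => a.length + b.length

def matches_main_character_py_alt (canonical_name : String) (main_character_keys : List String) : Bool :=
  let key := PySem.Str.lower canonical_name
  if main_character_keys.contains key then true
  else
    let xs := PySem.List.sorted (PySem.Set.ofList (PySem.Str.split₀ key)) (fun x => x) false
    let ys := PySem.List.sorted
      (PySem.Set.ofList (main_character_keys.flatMap PySem.Str.split₀)) (fun x => x) false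
    pvMergeHit xs ys

-- ===== PRECONDITION & SPEC =====
def Spec_matches_main_character_py (canonical_name : String) (main_character_keys : List String) (out : Bool) : Prop := out = matches_main_character_py_alt canonical_name main_character_keys
instance (canonical_name : String) (main_character_keys : List String) (out : Bool) : Decidable (Spec_matches_main_character_py canonical_name main_character_keys out) := by unfold Spec_matches_main_character_py; infer_instance

-- ===== CLAIM (what is proved, stated in full; the proofs are below) =====
def Claim_equal_matches_main_character_py : Prop := ∀ (canonical_name : String) (main_character_keys : List String), Dom_matches_main_character_py canonical_name main_character_keys → Spec_matches_main_character_py canonical_name main_character_keys (matches_main_character_py canonical_name main_character_keys)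

-- ===== LEMMAS AND PROOFS =====

-- every piece produced by str.split() is a nonempty string
lemma chars_split0_go_ne_nil (s cur : List Char) (acc : List (List Char))
    (hacc : ∀ t ∈ acc, t ≠ []) (hcur : cur ≠ [] → cur.reverse ≠ []) :
    ∀ t ∈ PySem.Chars.split₀.go s cur acc, t ≠ [] := by
  induction s generalizing cur acc with
  | nil =>
    intro t ht
    simp only [PySem.Chars.split₀.go] at ht
    by_cases h : cur.isEmpty = true
    · simp [h] at ht
      exact hacc t ht
    · simp [h] at ht
      rcases ht with h1 | h1
      · exact hacc t h1
      · subst h1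
        exact hcur (by simpa [List.isEmpty_iff] using h)
  | cons c rest ih =>
    intro t ht
    simp only [PySem.Chars.split₀.go] at ht
    by_cases hs : PySem.Chars.isspace c = true
    · by_cases h : cur.isEmpty = true
      · simp [hs, h] at ht
        exact ih [] acc hacc (by simp) t ht
      · simp [hs, h] at ht
        refine ih [] (cur.reverse :: acc) ?_ (by simp) t ht
        intro u hu
        rcases List.mem_cons.mp hu with hu1 | hu1
        · subst hu1; exact hcur (by simpa [List.isEmpty_iff] using h)
        · exact hacc u hu1
    · simp [hs] at ht
      exact ih (c :: cur) acc hacc (by simp) t ht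

lemma chars_split0_ne_nil (s : List Char) : ∀ t ∈ PySem.Chars.split₀ s, t ≠ [] := by
  intro t ht
  exact chars_split0_go_ne_nil s [] [] (by simp) (by simp) t ht

lemma str_split0_ne_empty (s : String) : ∀ t ∈ PySem.Str.split₀ s, t ≠ "" := by
  intro t ht hte
  have : t.toList ∈ (PySem.Str.split₀ s).map String.toList := List.mem_map_of_mem ht
  rw [PySem.Str.split₀_map_toList] at this
  have := chars_split0_ne_nil s.toList t.toList this
  subst hte
  simp at this

lemma filter_split0 (s : String) :
    (PySem.Str.split₀ s).filter (fun tok => tok ≠ "") = PySem.Str.split₀ s := by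
  apply List.filter_eq_self.mpr
  intro t ht
  simpa using str_split0_ne_empty s t ht

-- the merge scan on two ≤-sorted lists finds a hit iff the lists share an element
lemma pvMergeHit_iff (xs ys : List String)
    (hx : xs.Pairwise (· ≤ ·)) (hy : ys.Pairwise (· ≤ ·)) :
    pvMergeHit xs ys = true ↔ ∃ t, t ∈ xs ∧ t ∈ ys := by
  induction xs, ys using pvMergeHit.induct with
  | case1 ys => simp [pvMergeHit]
  | case2 x xs => simp [pvMergeHit]
  | case3 xs y ys =>
    simp only [pvMergeHit, if_true, true_iff]
    exact ⟨y, by simp, by simp⟩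
  | case4 x xs y ys hne hlt ih =>
    rw [List.pairwise_cons] at hx
    have hxy : pvMergeHit (x :: xs) (y :: ys) = pvMergeHit xs (y :: ys) := by
      simp [pvMergeHit, hne, hlt]
    rw [hxy, ih hx.2 hy]
    constructor
    · rintro ⟨t, ht1, ht2⟩; exact ⟨t, List.mem_cons_of_mem _ ht1, ht2⟩
    · rintro ⟨t, ht1, ht2⟩
      rcases List.mem_cons.mp ht1 with h1 | h1
      · subst h1
        exfalso
        rcases List.mem_cons.mp ht2 with h2 | h2
        · exact hne h2
        · rw [List.pairwise_cons] at hy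
          exact absurd rfl (ne_of_lt (lt_of_lt_of_le hlt (hy.1 t h2)))
      · exact ⟨t, h1, ht2⟩
  | case5 x xs y ys hne hnlt ih =>
    rw [List.pairwise_cons] at hy
    have hyx : y < x := lt_of_le_of_ne (le_of_not_gt hnlt) (fun h => hne h.symm)
    have hxy : pvMergeHit (x :: xs) (y :: ys) = pvMergeHit (x :: xs) ys := by
      simp [pvMergeHit, hne, hnlt]
    rw [hxy, ih hx hy.2]
    constructor
    · rintro ⟨t, ht1, ht2⟩; exact ⟨t, ht1, List.mem_cons_of_mem _ ht2⟩
    · rintro ⟨t, ht1, ht2⟩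
      rcases List.mem_cons.mp ht2 with h2 | h2
      · subst h2
        exfalso
        rcases List.mem_cons.mp ht1 with h1 | h1
        · exact hne h1.symm
        · rw [List.pairwise_cons] at hx
          exact absurd rfl (ne_of_lt (lt_of_lt_of_le hyx (hx.1 t h1)))
      · exact ⟨t, ht1, h2⟩

-- membership in the sorted deduplicated token lists
lemma mem_sorted_ofList (l : List String) (t : String) :
    t ∈ PySem.List.sorted (PySem.Set.ofList l) (fun x => x) false ↔ t ∈ l := by
  rw [PySem.List.mem_sorted, PySem.Set.mem_ofList]

-- ===== VERDICT (by name: the statement is the Claim_ definition above) =====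
theorem matches_main_character_py_spec : Claim_equal_matches_main_character_py := by
  intro canonical_name main_character_keys _
  unfold Spec_matches_main_character_py matches_main_character_py matches_main_character_py_alt
  simp only [filter_split0]
  by_cases hc : main_character_keys.contains (PySem.Str.lower canonical_name) = true
  · rw [if_pos hc, if_pos hc]
  · rw [if_neg hc, if_neg hc]
    rw [Bool.eq_iff_iff]
    rw [pvMergeHit_iff _ _ (PySem.List.sorted_pairwise _ _) (PySem.List.sorted_pairwise _ _)]
    constructor
    · intro hA
      by_cases he : (PySem.Set.ofList (PySem.Str.split₀ (PySem.Str.lower canonical_name))).isEmpty = true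
      · rw [if_pos he] at hA; exact absurd hA (by simp)
      · rw [if_neg he] at hA
        rw [List.any_eq_true] at hA
        rcases hA with ⟨n, hn, hne⟩
        rw [Bool.not_eq_eq_eq_not, Bool.not_true, List.isEmpty_eq_false_iff] at hne
        rcases List.exists_mem_of_ne_nil _ hne with ⟨t, ht⟩
        unfold PySem.Set.inter at ht
        rw [List.mem_filter] at ht
        rcases ht with ⟨h1, h2⟩
        refine ⟨t, (mem_sorted_ofList _ _).mpr ((PySem.Set.mem_ofList _ _).mp h1), ?_⟩
        rw [mem_sorted_ofList, List.mem_flatMap]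
        exact ⟨n, hn, (PySem.Set.mem_ofList _ _).mp ((PySem.Set.contains_iff _ _).mp h2)⟩
    · rintro ⟨t, ht1, ht2⟩
      rw [mem_sorted_ofList] at ht1
      rw [mem_sorted_ofList, List.mem_flatMap] at ht2
      rcases ht2 with ⟨n, hn, htn⟩
      have hne : ¬ (PySem.Set.ofList (PySem.Str.split₀ (PySem.Str.lower canonical_name))).isEmpty = true := by
        rw [List.isEmpty_iff]
        intro h0
        have := (PySem.Set.mem_ofList (PySem.Str.split₀ (PySem.Str.lower canonical_name)) t).mpr ht1
        simp [h0] at this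
      rw [if_neg hne, List.any_eq_true]
      refine ⟨n, hn, ?_⟩
      rw [Bool.not_eq_eq_eq_not, Bool.not_true, List.isEmpty_eq_false_iff]
      intro h0
      have hmem : t ∈ PySem.Set.inter (PySem.Set.ofList (PySem.Str.split₀ (PySem.Str.lower canonical_name)))
          (PySem.Set.ofList (PySem.Str.split₀ n)) := by
        unfold PySem.Set.inter
        rw [List.mem_filter]
        exact ⟨(PySem.Set.mem_ofList _ _).mpr ht1,
          (PySem.Set.contains_iff _ _).mpr ((PySem.Set.mem_ofList _ _).mpr htn)⟩
      simp [h0] at hmem
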